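-- pv_equiv track=rewrite | github.com/cathayc/BlogsAI | blogsai/reporting/generator.py | _extract_appendix_content
-- ===== SOURCE A (Python) =====
-- def _extract_appendix_content(analysis_content: str) -> str:
--     """Extract the appendix content (medium and lower priority articles)."""
--     lines = analysis_content.split("\n")
--     appendix_lines = []
--     in_appendix = False
--
--     for line in lines:
--         if "All Articles Reviewed" in line or "## All Articles" in line:
--             in_appendix = True
--
--         if in_appendix:
--             appendix_lines.append(line)
--
--     return "\n".join(appendix_lines)
-- ===== SOURCE B (Python) =====
-- def _extract_appendix_content(analysis_content: str) -> str:
--     """Extract the appendix content (medium and lower priority articles)."""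
--     lines = analysis_content.split("\n")
--     for i, line in enumerate(lines):
--         if "All Articles Reviewed" in line or "## All Articles" in line:
--             return "\n".join(lines[i:])
--     return ""
-- ===== Notes on version B (the rewrite author's own statement) =====
-- stated objective: simpler
-- what changed: Replaced the flag-and-append accumulation pass by a locate-then-slice decomposition: find the first marker line and join the suffix from there, returning the empty string when no marker is found.
import Mathlib
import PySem

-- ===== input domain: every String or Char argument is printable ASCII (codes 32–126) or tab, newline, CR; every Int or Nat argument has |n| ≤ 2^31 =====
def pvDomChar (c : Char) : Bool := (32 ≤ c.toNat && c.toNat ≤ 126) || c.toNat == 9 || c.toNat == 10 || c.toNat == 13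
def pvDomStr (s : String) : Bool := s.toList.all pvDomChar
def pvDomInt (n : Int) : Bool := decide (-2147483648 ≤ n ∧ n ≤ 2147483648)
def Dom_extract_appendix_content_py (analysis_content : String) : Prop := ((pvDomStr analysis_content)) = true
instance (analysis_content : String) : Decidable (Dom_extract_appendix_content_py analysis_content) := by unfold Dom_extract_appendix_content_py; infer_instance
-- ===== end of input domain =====

-- B changes only the decomposition: locate the first marker line, then join the suffix (objective: simpler).

-- ===== PORT A =====
-- A: split on "\n", then one pass with an in_appendix flag, appending every line once the flag is set.
def extract_appendix_content_py (analysis_content : String) : String :=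
  let lines := (PySem.Chars.splitOn analysis_content.toList "\n".toList).map String.ofList
  let st := lines.foldl (fun (acc : List String × Bool) line =>
      let in_appendix :=
        if PySem.Str.isIn "All Articles Reviewed" line || PySem.Str.isIn "## All Articles" line
        then true else acc.2
      (if in_appendix then acc.1 ++ [line] else acc.1, in_appendix)) ([], false)
  PySem.Str.join "\n" st.1

-- ===== PORT B =====
-- B: walk the split lines; at the first marker line return the join of the remaining suffix
-- (Python's '"\n".join(lines[i:])'); if no line matches, return "".
def extractGo (lines : List String) : String :=
  match lines with
  | [] => ""
  | line :: rest =>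
    if PySem.Str.isIn "All Articles Reviewed" line || PySem.Str.isIn "## All Articles" line
    then PySem.Str.join "\n" (line :: rest)
    else extractGo rest

def extract_appendix_content_py_alt (analysis_content : String) : String :=
  extractGo ((PySem.Chars.splitOn analysis_content.toList "\n".toList).map String.ofList)

-- ===== PRECONDITION & SPEC =====
def Spec_extract_appendix_content_py (analysis_content : String) (out : String) : Prop := out = extract_appendix_content_py_alt analysis_content
instance (analysis_content : String) (out : String) : Decidable (Spec_extract_appendix_content_py analysis_content out) := by unfold Spec_extract_appendix_content_py; infer_instance

-- ===== CLAIM (what is proved, stated in full; the proofs are below) =====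
def Claim_equal_extract_appendix_content_py : Prop := ∀ (analysis_content : String), Dom_extract_appendix_content_py analysis_content → Spec_extract_appendix_content_py analysis_content (extract_appendix_content_py analysis_content)

-- ===== LEMMAS AND PROOFS =====

def pvStep (acc : List String × Bool) (line : String) : List String × Bool :=
  let in_appendix :=
    if PySem.Str.isIn "All Articles Reviewed" line || PySem.Str.isIn "## All Articles" line
    then true else acc.2
  (if in_appendix then acc.1 ++ [line] else acc.1, in_appendix)

-- once the flag is true, every remaining line is appended
theorem pvFoldl_true (lines : List String) (acc : List String) :
    lines.foldl pvStep (acc, true) = (acc ++ lines, true) := by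
  induction lines generalizing acc with
  | nil => simp
  | cons l rest ih =>
    simp only [List.foldl_cons, pvStep]
    simp [ih]

theorem pvFoldl_eq_go (lines : List String) :
    PySem.Str.join "\n" (lines.foldl pvStep ([], false)).1 = extractGo lines := by
  induction lines with
  | nil => rfl
  | cons l rest ih =>
    simp only [List.foldl_cons, pvStep, extractGo]
    split
    · rename_i h
      simp only [Bool.or_eq_true] at h
      rcases h with h | h <;> simp [h, pvFoldl_true]
    · rename_i h
      simp only [Bool.or_eq_true, not_or, Bool.not_eq_true] at h
      simp [h.1, h.2, ih]

-- ===== VERDICT (by name: the statement is the Claim_ definition above) =====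
theorem extract_appendix_content_py_spec : Claim_equal_extract_appendix_content_py := by
  intro s _
  show extract_appendix_content_py s = extract_appendix_content_py_alt s
  unfold extract_appendix_content_py extract_appendix_content_py_alt
  exact pvFoldl_eq_go _
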